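-- pv_equiv track=rewrite | github.com/sicfran774/KanjiRecognizerAPI | src/send_email.py | count_kanji
-- ===== SOURCE A (Python) =====
-- def count_kanji(deck):
--     counts = [0, 0, 0]
--     if(deck):
--         for kanji in deck:
--             if(kanji['learning']):
--                 counts[1] += 1
--             elif(kanji['graduated']):
--                 counts[2] += 1
--             else:
--                 counts[0] += 1
--     return counts
-- ===== SOURCE B (Python) =====
-- def count_kanji(deck):
--     deck = deck or []
--     c1 = sum(1 for k in deck if k['learning'])
--     c2 = sum(1 for k in deck if not k['learning'] and k['graduated'])
--     c0 = sum(1 for k in deck if not k['learning'] and not k['graduated'])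
--     return [c0, c1, c2]
-- ===== Notes on version B (the rewrite author's own statement) =====
-- stated objective: alternative
-- what changed: replaces the single categorizing loop with three independent filtered counts (one full pass per category), the learning>graduated priority kept by explicit not-learning guards
import Mathlib
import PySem

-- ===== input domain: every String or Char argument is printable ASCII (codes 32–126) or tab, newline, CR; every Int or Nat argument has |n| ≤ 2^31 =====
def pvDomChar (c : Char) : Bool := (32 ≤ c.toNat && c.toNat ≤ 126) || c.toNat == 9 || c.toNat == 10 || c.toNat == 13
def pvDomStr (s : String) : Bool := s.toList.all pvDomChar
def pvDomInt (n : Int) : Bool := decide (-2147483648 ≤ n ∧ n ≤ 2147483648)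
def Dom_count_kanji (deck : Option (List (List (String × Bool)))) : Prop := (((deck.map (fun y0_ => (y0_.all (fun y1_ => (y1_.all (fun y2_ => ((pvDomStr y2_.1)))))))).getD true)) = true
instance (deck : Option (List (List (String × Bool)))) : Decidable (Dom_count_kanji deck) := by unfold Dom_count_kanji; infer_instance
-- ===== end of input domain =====

-- B replaces A's single categorizing loop by three independent filtered counts (same cost, different decomposition).


-- ===== PORT A =====
-- dict lookup kanji['key'] = first match in the association list; '.getD false' is exact
-- under Pre_count_kanji, which guarantees every lookup A performs succeeds.
def count_kanji (deck : Option (List (List (String × Bool)))) : List Int :=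
  -- counts = [0, 0, 0]; if(deck): the loop body runs only when deck is a non-empty list,
  -- and folding over the empty list leaves the counts untouched, so none ↦ [].
  let l := deck.getD []
  let s := l.foldl (fun (c : Int × Int × Int) kanji =>
    if (List.lookup "learning" kanji).getD false then (c.1, c.2.1 + 1, c.2.2)
    else if (List.lookup "graduated" kanji).getD false then (c.1, c.2.1, c.2.2 + 1)
    else (c.1 + 1, c.2.1, c.2.2)) ((0 : Int), (0 : Int), (0 : Int))
  [s.1, s.2.1, s.2.2]

-- ===== PORT B =====
-- three independent passes, one per category (Source B's three generator sums)
def count_kanji_alt (deck : Option (List (List (String × Bool)))) : List Int :=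
  let l := deck.getD []
  let c1 : Int := (l.countP (fun k => (List.lookup "learning" k).getD false) : Nat)
  let c2 : Int := (l.countP (fun k =>
      !(List.lookup "learning" k).getD false && (List.lookup "graduated" k).getD false) : Nat)
  let c0 : Int := (l.countP (fun k =>
      !(List.lookup "learning" k).getD false && !(List.lookup "graduated" k).getD false) : Nat)
  [c0, c1, c2]

-- ===== PRECONDITION & SPEC =====
-- Pre_ excludes decks containing a dict on which A raises KeyError: one missing
-- 'learning', or 'learning' falsy with 'graduated' missing (B raises there too).
def Pre_count_kanji (deck : Option (List (List (String × Bool)))) : Prop :=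
  ∀ k ∈ deck.getD [], (List.lookup "learning" k).isSome ∧
    ((List.lookup "learning" k).getD false = true ∨ (List.lookup "graduated" k).isSome)
instance (deck : Option (List (List (String × Bool)))) : Decidable (Pre_count_kanji deck) := by
  unfold Pre_count_kanji; infer_instance
def pvWitness_count_kanji : (Option (List (List (String × Bool)))) :=
  some [[("learning", true), ("graduated", false)], [("learning", false), ("graduated", true)]]
def Spec_count_kanji (deck : Option (List (List (String × Bool)))) (out : List Int) : Prop := out = count_kanji_alt deck
instance (deck : Option (List (List (String × Bool)))) (out : List Int) : Decidable (Spec_count_kanji deck out) := by unfold Spec_count_kanji; infer_instance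

-- ===== CLAIM (what is proved, stated in full; the proofs are below) =====
def Claim_equal_count_kanji : Prop := ∀ (deck : Option (List (List (String × Bool)))), Dom_count_kanji deck → Pre_count_kanji deck → Spec_count_kanji deck (count_kanji deck)

-- ===== LEMMAS AND PROOFS =====

-- A's fold starting from (a, b, c) adds exactly the three category counts.
lemma count_kanji_fold (l : List (List (String × Bool))) (a b c : Int) :
    l.foldl (fun (c : Int × Int × Int) kanji =>
      if (List.lookup "learning" kanji).getD false then (c.1, c.2.1 + 1, c.2.2)
      else if (List.lookup "graduated" kanji).getD false then (c.1, c.2.1, c.2.2 + 1)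
      else (c.1 + 1, c.2.1, c.2.2)) (a, b, c)
    = (a + (l.countP (fun k =>
          !(List.lookup "learning" k).getD false && !(List.lookup "graduated" k).getD false) : Nat),
       b + (l.countP (fun k => (List.lookup "learning" k).getD false) : Nat),
       c + (l.countP (fun k =>
          !(List.lookup "learning" k).getD false && (List.lookup "graduated" k).getD false) : Nat)) := by
  induction l generalizing a b c with
  | nil => simp
  | cons h t ih =>
    simp only [List.foldl_cons, List.countP_cons]
    by_cases hl : (List.lookup "learning" h).getD false
    · simp [hl, ih]; ring_nf
    · by_cases hg : (List.lookup "graduated" h).getD false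
      · simp [hl, hg, ih]; ring_nf
      · simp [hl, hg, ih]; ring_nf

-- ===== VERDICT (by name: the statement is the Claim_ definition above) =====
theorem count_kanji_spec : Claim_equal_count_kanji := by
  intro deck _ _
  unfold Spec_count_kanji count_kanji count_kanji_alt
  simp [count_kanji_fold]
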